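-- pv_equiv track=rewrite | github.com/Robot-Will/Stino | libs/base_utils/c_file.py | split_line_to_words
-- ===== SOURCE A (Python) =====
-- def split_line_by_str(line):
--     """Doc."""
--     indeces = [0]
--     in_single_quoted_character = False
--     in_double_quoted_string = False
--     in_single_line_comment = False
--     for index, char in enumerate(line):
--         in_str = (in_single_quoted_character or in_double_quoted_string or
--                   in_single_line_comment)
--         if in_str:
--             if index - 1 >= 0:
--                 pre_char = line[index - 1]
--                 if (char == '\'' and pre_char != '\\' and
--                         in_single_quoted_character):
--                     in_single_quoted_character = False
--                     indeces.append(index + 1)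
--                 elif (char == '"' and pre_char != '\\' and
--                         in_double_quoted_string):
--                     in_double_quoted_string = False
--                     indeces.append(index + 1)
--         else:
--             if char == '\'':
--                 in_single_quoted_character = True
--                 indeces.append(index)
--             elif char == '"':
--                 in_double_quoted_string = True
--                 indeces.append(index)
--             elif char == '/' and index + 1 < len(line):
--                 next_char = line[index + 1]
--                 if next_char == '/':
--                     in_single_line_comment = True
--                     indeces.append(index)
--     indeces.append(len(line))
--
--     start_indeces = indeces[:-1]
--     end_indeces = indeces[1:]
--     index_pairs = zip(start_indeces, end_indeces)
--     line_slices = []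
--     for index_pair in index_pairs:
--         line_slice = line[index_pair[0]:index_pair[1]].strip()
--         if line_slice:
--             line_slices.append(line_slice)
--     return line_slices
--
-- def split_line_to_words(line):
--     """Doc."""
--     words = []
--     line_slices = split_line_by_str(line)
--     for line_slice in line_slices:
--         if not line_slice:
--             continue
--         if (line_slice.startswith('\'') or line_slice.startswith('"') or
--                 line_slice.startswith('//')):
--             words.append(line_slice)
--         else:
--             words += line_slice.split()
--     return words
-- ===== SOURCE B (Python) =====
-- def split_line_to_words(line):
--     """Single-pass tokenizer: accumulate words directly instead of building an
--     index list and re-slicing the line."""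
--     words = []
--     buf = []        # current run: plain text, or the quoted token built so far
--     mode = ''       # '' = plain text, "'" or '"' = inside that kind of quote
--     i = 0
--     n = len(line)
--     while i < n:
--         c = line[i]
--         if mode:
--             if c == mode and buf[-1] != '\\':
--                 words.append(''.join(buf) + c)
--                 buf = []
--                 mode = ''
--             else:
--                 buf.append(c)
--         elif c == "'" or c == '"':
--             words.extend(''.join(buf).split())
--             buf = [c]
--             mode = c
--         elif c == '/' and i + 1 < n and line[i + 1] == '/':
--             words.extend(''.join(buf).split())
--             words.append(line[i:].rstrip())
--             return words
--         else:
--             buf.append(c)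
--         i += 1
--     if mode:
--         words.append(''.join(buf).rstrip())
--     else:
--         words.extend(''.join(buf).split())
--     return words
-- ===== Notes on version B (the rewrite author's own statement) =====
-- stated objective: alternative
-- what changed: A builds a list of boundary indices in one pass and then re-slices/strips/classifies the line in two more passes; B is a single-pass state-machine tokenizer that accumulates the current run in a buffer and emits finished words (whitespace-split plain runs, whole quoted tokens, the trailing comment) directly as it scans.
import Mathlib
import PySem

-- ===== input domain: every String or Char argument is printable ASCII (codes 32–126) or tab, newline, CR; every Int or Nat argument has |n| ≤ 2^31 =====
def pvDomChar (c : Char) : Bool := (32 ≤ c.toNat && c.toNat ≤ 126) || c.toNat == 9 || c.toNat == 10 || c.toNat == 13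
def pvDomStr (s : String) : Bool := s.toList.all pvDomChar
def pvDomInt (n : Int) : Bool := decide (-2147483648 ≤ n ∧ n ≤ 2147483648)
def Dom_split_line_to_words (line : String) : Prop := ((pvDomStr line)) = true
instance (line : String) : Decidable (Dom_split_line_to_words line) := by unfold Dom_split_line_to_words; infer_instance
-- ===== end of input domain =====

-- B replaces A's three-pass index-list/slice/classify pipeline with a single-pass tokenizer
-- that accumulates runs in a buffer and emits words directly (alternative decomposition, same cost).


-- ===== PORT A =====
-- one iteration of A's first for-loop: state = (indeces, in_single_quoted_character, in_double_quoted_string, in_single_line_comment)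
def pvAStep (cs : List Char) (st : List Int × Bool × Bool × Bool) (ic : Int × Char) :
    List Int × Bool × Bool × Bool :=
  let idx := st.1; let sq := st.2.1; let dq := st.2.2.1; let cm := st.2.2.2
  let i := ic.1; let c := ic.2
  let inStr := sq || dq || cm
  if inStr then
    if 0 ≤ i - 1 then
      let pre := PySem.List.pyGetD cs (i - 1) ' '   -- line[index-1]; index-1 is always in range here
      if c = '\'' ∧ pre ≠ '\\' ∧ sq = true then (idx ++ [i + 1], false, dq, cm)
      else if c = '"' ∧ pre ≠ '\\' ∧ dq = true then (idx ++ [i + 1], sq, false, cm)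
      else st
    else st
  else
    if c = '\'' then (idx ++ [i], true, dq, cm)
    else if c = '"' then (idx ++ [i], sq, true, cm)
    else if c = '/' ∧ i + 1 < (cs.length : Int) then
      let nc := PySem.List.pyGetD cs (i + 1) ' '    -- line[index+1], in range by the guard
      if nc = '/' then (idx ++ [i], sq, dq, true) else st
    else st

-- split_line_by_str, on the character list
def pvASlices (cs : List Char) : List (List Char) :=
  let r := List.foldl (pvAStep cs) ([0], false, false, false) (PySem.List.enumerate cs 0)
  let indeces := r.1 ++ [(cs.length : Int)]
  let startIndeces := PySem.List.slice indeces none (some (-1))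
  let endIndeces := PySem.List.slice indeces (some 1) none
  let indexPairs := startIndeces.zip endIndeces
  List.foldl (fun acc p =>
    let sl := PySem.Chars.strip (PySem.List.slice cs (some p.1) (some p.2))
    if sl ≠ [] then acc ++ [sl] else acc) [] indexPairs

def split_line_to_words (line : String) : List String :=
  (List.foldl (fun ws sl =>
      if sl = [] then ws
      else if PySem.Chars.startswith sl ['\''] || PySem.Chars.startswith sl ['"'] ||
              PySem.Chars.startswith sl ['/', '/'] then ws ++ [sl]
      else ws ++ PySem.Chars.split₀ sl) [] (pvASlices line.toList)).map String.ofList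

-- ===== PORT B =====
-- B's while-loop: r is line[i:]; mode '' ↦ none, quote char ↦ some q
def pvBGo (words : List (List Char)) (buf : List Char) (mode : Option Char) :
    List Char → List (List Char)
  | [] =>
      match mode with
      | some _ => words ++ [PySem.Chars.rstrip buf]
      | none => words ++ PySem.Chars.split₀ buf
  | c :: rest =>
      match mode with
      | some q =>
          if c = q ∧ PySem.List.pyGetD buf (-1) ' ' ≠ '\\' then
            pvBGo (words ++ [buf ++ [c]]) [] none rest
          else pvBGo words (buf ++ [c]) (some q) rest
      | none =>
          if c = '\'' ∨ c = '"' then pvBGo (words ++ PySem.Chars.split₀ buf) [c] (some c) rest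
          else if c = '/' ∧ rest.head? = some '/' then
            (words ++ PySem.Chars.split₀ buf) ++ [PySem.Chars.rstrip (c :: rest)]
          else pvBGo words (buf ++ [c]) none rest

def split_line_to_words_alt (line : String) : List String :=
  (pvBGo [] [] none line.toList).map String.ofList

-- ===== PRECONDITION & SPEC =====
def Spec_split_line_to_words (line : String) (out : List String) : Prop := out = split_line_to_words_alt line
instance (line : String) (out : List String) : Decidable (Spec_split_line_to_words line out) := by unfold Spec_split_line_to_words; infer_instance

-- ===== CLAIM (what is proved, stated in full; the proofs are below) =====
def Claim_equal_split_line_to_words : Prop := ∀ (line : String), Dom_split_line_to_words line → Spec_split_line_to_words line (split_line_to_words line)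

-- ===== LEMMAS AND PROOFS =====

-- consecutive pairs of an index list, = zip(indeces[:-1], indeces[1:])
def pvPairs (L : List Int) : List (Int × Int) := L.dropLast.zip L.tail

-- the words contributed by one (already stripped) slice in A's second loop
def pvW (t : List Char) : List (List Char) :=
  if PySem.Chars.startswith t ['\''] || PySem.Chars.startswith t ['"'] ||
     PySem.Chars.startswith t ['/', '/'] then [t]
  else PySem.Chars.split₀ t

-- the words contributed by one index pair
def pvPW (cs : List Char) (pr : Int × Int) : List (List Char) :=
  pvW (PySem.Chars.strip (PySem.List.slice cs (some pr.1) (some pr.2)))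

-- A's flag triple corresponding to B's mode
def pvFlags : Option Char → Bool × Bool × Bool
  | none => (false, false, false)
  | some q => (q = '\'', q = '"', false)

-- invariant tying B's buffer to the scan state
def pvInv : Option Char → List Char → List Char → Prop
  | none, buf, r => '\'' ∉ buf ∧ '"' ∉ buf ∧ ¬ ['/', '/'] <:+: buf ∧
      (buf.getLast? = some '/' → r.head? ≠ some '/')
  | some q, buf, _ => (q = '\'' ∨ q = '"') ∧ ∃ t, buf = q :: t

theorem pvAStep_split (cs : List Char) (I : List Int) (f : Bool × Bool × Bool) (ic : Int × Char) :
    pvAStep cs (I, f) ic = (I ++ (pvAStep cs ([], f) ic).1, (pvAStep cs ([], f) ic).2) := by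
  obtain ⟨sq, dq, cm⟩ := f
  simp only [pvAStep]
  split_ifs <;> simp

theorem pvFold_split (cs : List Char) (l : List (Int × Char)) (I : List Int) (f : Bool × Bool × Bool) :
    List.foldl (pvAStep cs) (I, f) l =
      (I ++ (List.foldl (pvAStep cs) ([], f) l).1, (List.foldl (pvAStep cs) ([], f) l).2) := by
  induction l generalizing I f with
  | nil => simp
  | cons x l ih =>
      rw [List.foldl_cons, List.foldl_cons, pvAStep_split]
      rw [ih, ih ((pvAStep cs ([], f) x).1) ((pvAStep cs ([], f) x).2), List.append_assoc]

theorem pvAStep_comment (cs : List Char) (ic : Int × Char) :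
    pvAStep cs ([], (false, false, true)) ic = ([], (false, false, true)) := by
  simp only [pvAStep]
  split_ifs <;> simp_all

theorem pvFold_comment (cs : List Char) (l : List (Int × Char)) :
    List.foldl (pvAStep cs) ([], (false, false, true)) l = ([], (false, false, true)) := by
  induction l with
  | nil => rfl
  | cons x l ih => rw [List.foldl_cons, pvAStep_comment, ih]

-- ---- strip / split₀ facts ----

theorem pvDropWhile_concat (p : Char → Bool) (xs : List Char) (a : Char) (h : p a = false) :
    List.dropWhile p (xs ++ [a]) = xs.dropWhile p ++ [a] := by
  induction xs with
  | nil => simp [List.dropWhile, h]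
  | cons c xs ih =>
      by_cases hc : p c
      · simpa [hc] using ih
      · simp [hc]

theorem pvRstrip_cons (a : Char) (s : List Char) (h : PySem.Chars.isspace a = false) :
    PySem.Chars.rstrip (a :: s) = a :: PySem.Chars.rstrip s := by
  simp only [PySem.Chars.rstrip, List.reverse_cons, pvDropWhile_concat _ _ _ h, List.reverse_append]
  rfl

theorem pvRstrip_concat (s : List Char) (a : Char) (h : PySem.Chars.isspace a = false) :
    PySem.Chars.rstrip (s ++ [a]) = s ++ [a] := by
  simp [PySem.Chars.rstrip, h]

theorem pvLstrip_cons (a : Char) (s : List Char) (h : PySem.Chars.isspace a = false) :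
    PySem.Chars.lstrip (a :: s) = a :: s := by
  simp [PySem.Chars.lstrip, h]

theorem pvStrip_cons (a : Char) (s : List Char) (h : PySem.Chars.isspace a = false) :
    PySem.Chars.strip (a :: s) = a :: PySem.Chars.rstrip s := by
  rw [PySem.Chars.strip, pvLstrip_cons a s h, pvRstrip_cons a s h]

theorem pvGo_nil_spaces (t : List Char) (h : ∀ c ∈ t, PySem.Chars.isspace c = true) :
    ∀ (cur : List Char) (acc : List (List Char)),
      PySem.Chars.split₀.go t cur acc = PySem.Chars.split₀.go [] cur acc := by
  induction t with
  | nil => intro cur acc; rfl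
  | cons c t ih =>
      intro cur acc
      have hc : PySem.Chars.isspace c = true := h c (by simp)
      have ht : ∀ c ∈ t, PySem.Chars.isspace c = true := fun d hd => h d (by simp [hd])
      by_cases hcur : cur.isEmpty
      · simp [PySem.Chars.split₀.go, hc, hcur, ih ht, PySem.Chars.split₀.go]
      · simp [PySem.Chars.split₀.go, hc, hcur, ih ht, PySem.Chars.split₀.go]

theorem pvGo_append_spaces (t : List Char) (h : ∀ c ∈ t, PySem.Chars.isspace c = true) :
    ∀ (s cur : List Char) (acc : List (List Char)),
      PySem.Chars.split₀.go (s ++ t) cur acc = PySem.Chars.split₀.go s cur acc := by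
  intro s
  induction s with
  | nil =>
      intro cur acc
      simpa using pvGo_nil_spaces t h cur acc
  | cons c s ih =>
      intro cur acc
      by_cases hc : PySem.Chars.isspace c
      · by_cases hcur : cur.isEmpty <;>
          simp [PySem.Chars.split₀.go, hc, hcur, ih]
      · simp [PySem.Chars.split₀.go, hc, ih]

theorem pvSplit0_rstrip (s : List Char) :
    PySem.Chars.split₀ (PySem.Chars.rstrip s) = PySem.Chars.split₀ s := by
  have hdec : PySem.Chars.rstrip s ++ (s.reverse.takeWhile PySem.Chars.isspace).reverse = s := by
    rw [PySem.Chars.rstrip, ← List.reverse_append, List.takeWhile_append_dropWhile, List.reverse_reverse]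
  have hsp : ∀ c ∈ (s.reverse.takeWhile PySem.Chars.isspace).reverse, PySem.Chars.isspace c = true := by
    intro c hc
    exact List.mem_takeWhile_imp (List.mem_reverse.mp hc)
  conv_rhs => rw [← hdec]
  rw [PySem.Chars.split₀, PySem.Chars.split₀, pvGo_append_spaces _ hsp]

theorem pvSplit0_lstrip (s : List Char) :
    PySem.Chars.split₀ (PySem.Chars.lstrip s) = PySem.Chars.split₀ s := by
  induction s with
  | nil => rfl
  | cons c s ih =>
      by_cases hc : PySem.Chars.isspace c
      · have h1 : PySem.Chars.lstrip (c :: s) = PySem.Chars.lstrip s := by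
          simp [PySem.Chars.lstrip, hc]
        have h2 : PySem.Chars.split₀ (c :: s) = PySem.Chars.split₀ s := by
          simp [PySem.Chars.split₀, PySem.Chars.split₀.go, hc]
        rw [h1, h2, ih]
      · simp [PySem.Chars.lstrip, hc]

theorem pvSplit0_strip (s : List Char) :
    PySem.Chars.split₀ (PySem.Chars.strip s) = PySem.Chars.split₀ s := by
  rw [PySem.Chars.strip, pvSplit0_rstrip, pvSplit0_lstrip]

theorem pvRstrip_prefix (s : List Char) : PySem.Chars.rstrip s <+: s := by
  have h := List.dropWhile_suffix (l := s.reverse) PySem.Chars.isspace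
  have := List.reverse_prefix.mpr h
  simpa [PySem.Chars.rstrip] using this

theorem pvStrip_infix (s : List Char) : PySem.Chars.strip s <:+: s := by
  have h1 : PySem.Chars.strip s <+: PySem.Chars.lstrip s := pvRstrip_prefix _
  have h2 : PySem.Chars.lstrip s <:+ s := List.dropWhile_suffix _
  exact h1.isInfix.trans h2.isInfix

theorem pvW_plain (t : List Char) (h1 : '\'' ∉ t) (h2 : '"' ∉ t)
    (h3 : ¬ ['/', '/'] <:+: t) : pvW (PySem.Chars.strip t) = PySem.Chars.split₀ t := by
  have hinf := pvStrip_infix t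
  have e1 : PySem.Chars.startswith (PySem.Chars.strip t) ['\''] = false := by
    by_contra h
    have : ['\''] <+: PySem.Chars.strip t :=
      (PySem.Chars.startswith_iff _ _).mp (by revert h; cases PySem.Chars.startswith (PySem.Chars.strip t) ['\''] <;> simp)
    exact h1 (hinf.subset (this.subset (by simp)))
  have e2 : PySem.Chars.startswith (PySem.Chars.strip t) ['"'] = false := by
    by_contra h
    have : ['"'] <+: PySem.Chars.strip t :=
      (PySem.Chars.startswith_iff _ _).mp (by revert h; cases PySem.Chars.startswith (PySem.Chars.strip t) ['"'] <;> simp)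
    exact h2 (hinf.subset (this.subset (by simp)))
  have e3 : PySem.Chars.startswith (PySem.Chars.strip t) ['/', '/'] = false := by
    by_contra h
    have hp : ['/', '/'] <+: PySem.Chars.strip t :=
      (PySem.Chars.startswith_iff _ _).mp (by revert h; cases PySem.Chars.startswith (PySem.Chars.strip t) ['/', '/'] <;> simp)
    exact h3 (hp.isInfix.trans hinf)
  rw [pvW, e1, e2, e3]
  simp [pvSplit0_strip]

theorem pvW_nil : pvW [] = [] := by decide

-- ---- rewriting A's two output folds into a flatMap over index pairs ----

theorem pvClassify_fold (sls : List (List Char)) (init : List (List Char)) :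
    List.foldl (fun ws sl =>
      if sl = [] then ws
      else if PySem.Chars.startswith sl ['\''] || PySem.Chars.startswith sl ['"'] ||
              PySem.Chars.startswith sl ['/', '/'] then ws ++ [sl]
      else ws ++ PySem.Chars.split₀ sl) init sls = init ++ sls.flatMap pvW := by
  have hfun : (fun (ws : List (List Char)) sl =>
      if sl = [] then ws
      else if PySem.Chars.startswith sl ['\''] || PySem.Chars.startswith sl ['"'] ||
              PySem.Chars.startswith sl ['/', '/'] then ws ++ [sl]
      else ws ++ PySem.Chars.split₀ sl) = fun ws sl => ws ++ pvW sl := by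
    funext ws sl
    by_cases hnil : sl = []
    · subst hnil; simp [pvW_nil]
    · rw [if_neg hnil, pvW]; split_ifs <;> rfl
  rw [hfun, PySem.List.foldl_append_eq_flatMap]

theorem pvSF_fold (cs : List Char) (l : List (Int × Int)) (init : List (List Char)) :
    List.foldl (fun acc p =>
      let sl := PySem.Chars.strip (PySem.List.slice cs (some p.1) (some p.2))
      if sl ≠ [] then acc ++ [sl] else acc) init l =
    init ++ l.flatMap (fun p =>
      let sl := PySem.Chars.strip (PySem.List.slice cs (some p.1) (some p.2))
      if sl ≠ [] then [sl] else []) := by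
  have hfun : (fun (acc : List (List Char)) (p : Int × Int) =>
      let sl := PySem.Chars.strip (PySem.List.slice cs (some p.1) (some p.2))
      if sl ≠ [] then acc ++ [sl] else acc) = fun acc p => acc ++
        (let sl := PySem.Chars.strip (PySem.List.slice cs (some p.1) (some p.2))
         if sl ≠ [] then [sl] else []) := by
    funext acc p
    simp only []
    split_ifs <;> simp
  rw [hfun, PySem.List.foldl_append_eq_flatMap]

theorem pvA_words (cs : List Char) :
    List.foldl (fun ws sl =>
      if sl = [] then ws
      else if PySem.Chars.startswith sl ['\''] || PySem.Chars.startswith sl ['"'] ||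
              PySem.Chars.startswith sl ['/', '/'] then ws ++ [sl]
      else ws ++ PySem.Chars.split₀ sl) [] (pvASlices cs) =
    (pvPairs ((0 : Int) ::
        (List.foldl (pvAStep cs) ([], (false, false, false)) (PySem.List.enumerate cs 0)).1 ++
        [(cs.length : Int)])).flatMap (pvPW cs) := by
  rw [pvClassify_fold]
  simp only [pvASlices]
  rw [pvFold_split, pvSF_fold, PySem.List.slice_to_neg_one, PySem.List.slice_from_one]
  simp only [List.nil_append, List.singleton_append, pvPairs]
  rw [List.flatMap_assoc]
  have hfun : ∀ p : Int × Int,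
      (let sl := PySem.Chars.strip (PySem.List.slice cs (some p.1) (some p.2))
       if sl ≠ [] then [sl] else []).flatMap pvW = pvPW cs p := by
    intro p
    simp only [pvPW]
    split_ifs with h
    · simp
    · simp only [ne_eq, not_not] at h
      simp [h, pvW_nil]
  exact List.flatMap_congr (fun p _ => hfun p)

-- ---- index/list bookkeeping ----

theorem pvPairs_cons₂ (a b : Int) (t : List Int) :
    pvPairs (a :: b :: t) = (a, b) :: pvPairs (b :: t) := by
  simp [pvPairs, List.dropLast_cons₂]

theorem pvDrop_succ (cs : List Char) (n : Nat) (c : Char) (rest : List Char)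
    (hd : cs.drop n = c :: rest) : cs.drop (n + 1) = rest := by
  have h : List.drop 1 (List.drop n cs) = List.drop (n + 1) cs := List.drop_drop
  rw [← h, hd, List.drop_one, List.tail_cons]

theorem pvLen_lt (cs : List Char) (n : Nat) (c : Char) (rest : List Char)
    (hd : cs.drop n = c :: rest) : n < cs.length ∧ cs.length = n + 1 + rest.length := by
  have h : (List.drop n cs).length = cs.length - n := List.length_drop
  rw [hd] at h
  simp only [List.length_cons] at h
  omega

theorem pvGetElem?_at (cs : List Char) (n : Nat) (c : Char) (rest : List Char)
    (hd : cs.drop n = c :: rest) : cs[n]? = some c := by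
  have h : (List.drop n cs)[0]? = cs[n + 0]? := List.getElem?_drop
  rw [hd] at h
  simpa using h.symm

theorem pvTake_succ (cs : List Char) (s n : Nat) (c : Char) (rest : List Char)
    (hd : cs.drop n = c :: rest) (hs : s ≤ n) :
    (cs.drop s).take (n + 1 - s) = (cs.drop s).take (n - s) ++ [c] := by
  have h1 : n + 1 - s = (n - s) + 1 := by omega
  rw [h1, List.take_add_one]
  have h2 : (cs.drop s)[n - s]? = cs[s + (n - s)]? := List.getElem?_drop
  have h3 : s + (n - s) = n := by omega
  rw [h2, h3, pvGetElem?_at cs n c rest hd]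
  rfl

theorem pvBuf_len (cs : List Char) (s n : Nat) (hs : s ≤ n) (hn : n ≤ cs.length) :
    ((cs.drop s).take (n - s)).length = n - s := by
  simp only [List.length_take, List.length_drop]
  omega

theorem pvBuf_full (cs : List Char) (s n : Nat) (hn : cs.length ≤ n) :
    (cs.drop s).take (n - s) = cs.drop s := by
  apply List.take_of_length_le
  simp only [List.length_drop]
  omega

theorem pvLast_eq (cs : List Char) (s n : Nat) (buf : List Char) (hs : s ≤ n) (hn : n ≤ cs.length)
    (hbuf : buf = (cs.drop s).take (n - s)) (hne : buf ≠ []) :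
    PySem.List.pyGetD cs ((n : Int) - 1) ' ' = PySem.List.pyGetD buf (-1) ' ' := by
  have hlen : buf.length = n - s := by rw [hbuf]; exact pvBuf_len cs s n hs hn
  have hpos : 0 < n - s := by
    rcases Nat.eq_zero_or_pos (n - s) with h | h
    · exact absurd (List.length_eq_zero_iff.mp (hlen.trans h)) hne
    · exact h
  have hcast : ((n : Int) - 1) = ((n - 1 : Nat) : Int) := by omega
  rw [hcast, PySem.List.pyGetD_natCast, PySem.List.pyGetD_neg_one buf ' ' hne]
  have hidx : n - 1 - s < buf.length := by omega
  have e1 : buf[n - 1 - s]? = cs[n - 1]? := by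
    rw [hbuf, List.getElem?_take_of_lt (by omega), List.getElem?_drop]
    congr 1
    omega
  have e2 : buf.getLast hne = buf[n - 1 - s] := by
    rw [List.getLast_eq_getElem]
    congr 1
    omega
  have e3 : cs[n - 1]? = some (buf[n - 1 - s]) := by
    rw [← e1, List.getElem?_eq_getElem hidx]
  rw [List.getD_eq_getElem?_getD, e3, e2]
  rfl

theorem pvInfix_concat {α : Type} (ps xs : List α) (c : α) (h : ps <:+: xs ++ [c]) :
    ps <:+: xs ∨ ps <:+ (xs ++ [c]) := by
  obtain ⟨s, t, hst⟩ := h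
  rcases List.eq_nil_or_concat t with rfl | ⟨t', d, rfl⟩

  · right; exact ⟨s, by simpa using hst⟩
  · left
    have h2 : (s ++ ps ++ t') ++ [d] = xs ++ [c] := by
      rw [← hst]; simp [List.append_assoc]
    obtain ⟨h3, -⟩ := List.append_inj' h2 rfl
    exact ⟨s, t', h3⟩

theorem pvInv_plain_step (buf : List Char) (c : Char) (rest : List Char)
    (h : pvInv none buf (c :: rest)) (hq1 : c ≠ '\'') (hq2 : c ≠ '"')
    (hcm : ¬ (c = '/' ∧ rest.head? = some '/')) : pvInv none (buf ++ [c]) rest := by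
  obtain ⟨h1, h2, h3, h4⟩ := h
  refine ⟨?_, ?_, ?_, ?_⟩
  · simp only [List.mem_append, List.mem_singleton]
    rintro (h | h)
    · exact h1 h
    · exact hq1 h.symm
  · simp only [List.mem_append, List.mem_singleton]
    rintro (h | h)
    · exact h2 h
    · exact hq2 h.symm
  · intro hinf
    rcases pvInfix_concat _ _ _ hinf with hx | hsfx
    · exact h3 hx
    · obtain ⟨ys, hy⟩ := hsfx
      have h5 : (ys ++ ['/']) ++ ['/'] = buf ++ [c] := by
        rw [← hy]; simp
      obtain ⟨h6, h7⟩ := List.append_inj' h5 rfl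
      have hc : c = '/' := by simpa using h7.symm
      have hl : buf.getLast? = some '/' := by
        rw [← h6, List.getLast?_concat]
      have := h4 hl
      simp only [List.head?_cons] at this
      exact this (by rw [hc])
  · rw [List.getLast?_concat]
    intro h5
    have hc : c = '/' := by simpa using h5
    intro h6
    exact hcm ⟨hc, h6⟩

theorem pvBGo_append : ∀ (r : List Char) (ws : List (List Char)) (buf : List Char) (m : Option Char),
    pvBGo ws buf m r = ws ++ pvBGo [] buf m r := by
  intro r
  induction r with
  | nil => intro ws buf m; cases m <;> simp [pvBGo]
  | cons c rest ih =>
      intro ws buf m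
      cases m with
      | some q =>
          by_cases h : c = q ∧ PySem.List.pyGetD buf (-1) ' ' ≠ '\\'
          · rw [pvBGo, pvBGo, if_pos h, if_pos h, ih (ws ++ [buf ++ [c]]) _ _,
              ih ([] ++ [buf ++ [c]]) _ _]
            simp
          · rw [pvBGo, pvBGo, if_neg h, if_neg h, ih ws _ _, ih [] _ _]
      | none =>
          by_cases h1 : c = '\'' ∨ c = '"'
          · rw [pvBGo, pvBGo, if_pos h1, if_pos h1, ih (ws ++ PySem.Chars.split₀ buf) _ _,
              ih ([] ++ PySem.Chars.split₀ buf) _ _]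
            simp
          · by_cases h2 : c = '/' ∧ rest.head? = some '/'
            · rw [pvBGo, pvBGo, if_neg h1, if_neg h1, if_pos h2, if_pos h2]
              simp
            · rw [pvBGo, pvBGo, if_neg h1, if_neg h1, if_neg h2, if_neg h2,
                ih ws _ _, ih [] _ _]

-- ---- one-step evaluations of A's loop body ----

theorem pvAStep_plain_quote (cs : List Char) (n : Nat) (c : Char)
    (hc : c = '\'' ∨ c = '"') :
    pvAStep cs ([], pvFlags none) ((n : Int), c) = ([(n : Int)], pvFlags (some c)) := by
  rcases hc with rfl | rfl <;> simp [pvAStep, pvFlags]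

theorem pvAStep_plain_comment (cs : List Char) (n : Nat) (c : Char) (rest : List Char)
    (hd : cs.drop n = c :: rest) (hc : c = '/') (hr : rest.head? = some '/') :
    pvAStep cs ([], pvFlags none) ((n : Int), c) = ([(n : Int)], (false, false, true)) := by
  obtain ⟨hnlt, hlen⟩ := pvLen_lt cs n c rest hd
  obtain ⟨r0, rest₂, rfl⟩ : ∃ r0 rest₂, rest = r0 :: rest₂ := by
    cases rest with
    | nil => simp at hr
    | cons a b => exact ⟨a, b, rfl⟩
  have hr0 : r0 = '/' := by simpa using hr
  have hd' := pvDrop_succ cs n c _ hd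
  have hget : cs[n + 1]? = some r0 := pvGetElem?_at cs (n + 1) r0 rest₂ hd'
  have hnc : PySem.List.pyGetD cs ((n : Int) + 1) ' ' = r0 := by
    have hcast : ((n : Int) + 1) = ((n + 1 : Nat) : Int) := by push_cast; ring
    rw [hcast, PySem.List.pyGetD_natCast, List.getD_eq_getElem?_getD, hget]
    rfl
  have hlt : ((n : Int) + 1) < (cs.length : Int) := by
    simp only [List.length_cons] at hlen
    omega
  simp [pvAStep, pvFlags, hc, hlt, hnc, hr0]

theorem pvAStep_plain_else (cs : List Char) (n : Nat) (c : Char) (rest : List Char)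
    (hd : cs.drop n = c :: rest) (hc1 : c ≠ '\'') (hc2 : c ≠ '"')
    (hcm : ¬ (c = '/' ∧ rest.head? = some '/')) :
    pvAStep cs ([], pvFlags none) ((n : Int), c) = ([], pvFlags none) := by
  obtain ⟨hnlt, hlen⟩ := pvLen_lt cs n c rest hd
  by_cases hc : c = '/'
  · cases rest with
    | nil =>
        have hlt : ¬ ((n : Int) + 1 < (cs.length : Int)) := by
          simp only [List.length_nil] at hlen
          omega
        simp [pvAStep, pvFlags, hc1, hc2, hlt]
    | cons r0 rest₂ =>
        have hr0 : r0 ≠ '/' := by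
          intro h
          exact hcm ⟨hc, by simp [h]⟩
        have hd' := pvDrop_succ cs n c _ hd
        have hget : cs[n + 1]? = some r0 := pvGetElem?_at cs (n + 1) r0 rest₂ hd'
        have hnc : PySem.List.pyGetD cs ((n : Int) + 1) ' ' = r0 := by
          have hcast : ((n : Int) + 1) = ((n + 1 : Nat) : Int) := by push_cast; ring
          rw [hcast, PySem.List.pyGetD_natCast, List.getD_eq_getElem?_getD, hget]
          rfl
        simp [pvAStep, pvFlags, hc1, hc2, hnc, hr0]
  · simp [pvAStep, pvFlags, hc1, hc2, hc]

theorem pvAStep_quote_close (cs : List Char) (n : Nat) (c q : Char) (buf : List Char)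
    (hq : q = '\'' ∨ q = '"') (hn1 : 1 ≤ n)
    (hpre : PySem.List.pyGetD cs ((n : Int) - 1) ' ' = PySem.List.pyGetD buf (-1) ' ')
    (hc : c = q) (hesc : PySem.List.pyGetD buf (-1) ' ' ≠ '\\') :
    pvAStep cs ([], pvFlags (some q)) ((n : Int), c) = ([(n : Int) + 1], pvFlags none) := by
  have hn1' : (0 : Int) ≤ (n : Int) - 1 := by omega
  rcases hq with rfl | rfl <;> simp [pvAStep, pvFlags, hpre, hc, hesc] <;> omega

theorem pvAStep_quote_stay (cs : List Char) (n : Nat) (c q : Char) (buf : List Char)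
    (hq : q = '\'' ∨ q = '"') (hn1 : 1 ≤ n)
    (hpre : PySem.List.pyGetD cs ((n : Int) - 1) ' ' = PySem.List.pyGetD buf (-1) ' ')
    (hP : ¬ (c = q ∧ PySem.List.pyGetD buf (-1) ' ' ≠ '\\')) :
    pvAStep cs ([], pvFlags (some q)) ((n : Int), c) = ([], pvFlags (some q)) := by
  have hn1' : (0 : Int) ≤ (n : Int) - 1 := by omega
  by_cases hc : c = q
  · have hesc : PySem.List.pyGetD buf (-1) ' ' = '\\' := by
      by_contra h
      exact hP ⟨hc, h⟩
    rcases hq with rfl | rfl <;> simp [pvAStep, pvFlags, hpre, hc, hesc]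
  · rcases hq with rfl | rfl <;> simp [pvAStep, pvFlags, hpre, hc]

-- words contributed by a quoted/comment slice starting with a quote char
theorem pvW_quote (q : Char) (x : List Char) (hq : q = '\'' ∨ q = '"') :
    pvW (q :: x) = [q :: x] := by
  rcases hq with rfl | rfl <;> simp [pvW, PySem.Chars.startswith, List.isPrefixOf]

theorem pvW_comment (x : List Char) : pvW ('/' :: '/' :: x) = ['/' :: '/' :: x] := by
  simp [pvW, PySem.Chars.startswith, List.isPrefixOf]

-- ---- the main simulation ----

theorem pvMain (cs : List Char) : ∀ (r : List Char) (n s : Nat) (buf : List Char) (mode : Option Char),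
    cs.drop n = r → s ≤ n → buf = (cs.drop s).take (n - s) → pvInv mode buf r →
    (pvPairs ((s : Int) ::
        ((List.foldl (pvAStep cs) ([], pvFlags mode) (PySem.List.enumerate r (n : Int))).1 ++
         [(cs.length : Int)]))).flatMap (pvPW cs)
      = pvBGo [] buf mode r := by
  intro r
  induction r with
  | nil =>
      intro n s buf mode hd hs hbuf hinv
      have hn : cs.length ≤ n := by
        have h : (List.drop n cs).length = cs.length - n := List.length_drop
        rw [hd] at h
        simp only [List.length_nil] at h
        omega
      have hbuf' : buf = cs.drop s := by rw [hbuf]; exact pvBuf_full cs s n hn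
      have hslice : PySem.List.slice cs (some (s : Int)) (some (cs.length : Int)) = buf := by
        rw [PySem.List.slice_natCast, hbuf']
        exact List.take_of_length_le (by simp)
      rw [PySem.List.enumerate_nil, List.foldl_nil]
      simp only [List.nil_append]
      have hpairs : pvPairs [(s : Int), (cs.length : Int)] = [((s : Int), (cs.length : Int))] := by
        simp [pvPairs]
      rw [hpairs, List.flatMap_cons, List.flatMap_nil, List.append_nil]
      cases mode with
      | none =>
          obtain ⟨h1, h2, h3, h4⟩ := hinv
          rw [pvBGo]
          simp only [List.nil_append]
          rw [pvPW]
          simp only [hslice]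
          exact pvW_plain buf h1 h2 h3
      | some q =>
          obtain ⟨hq, t, rfl⟩ := hinv
          have hqs : PySem.Chars.isspace q = false := by rcases hq with rfl | rfl <;> decide
          rw [pvBGo]
          simp only [List.nil_append]
          rw [pvPW]
          simp only [hslice]
          rw [pvStrip_cons q t hqs, pvW_quote q _ hq, pvRstrip_cons q t hqs]
  | cons c rest ih =>
      intro n s buf mode hd hs hbuf hinv
      obtain ⟨hnlt, hlen⟩ := pvLen_lt cs n c rest hd
      have hd' : cs.drop (n + 1) = rest := pvDrop_succ cs n c rest hd
      have hcast : ((n : Int) + 1) = ((n + 1 : Nat) : Int) := by push_cast; ring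
      have hslice : PySem.List.slice cs (some (s : Int)) (some (n : Int)) = buf := by
        rw [PySem.List.slice_natCast, hbuf]
      have hslice1 : PySem.List.slice cs (some (s : Int)) (some ((n + 1 : Nat) : Int)) =
          buf ++ [c] := by
        rw [PySem.List.slice_natCast, hbuf]
        exact pvTake_succ cs s n c rest hd hs
      have hbufc : (cs.drop n).take 1 = [c] := by rw [hd]; rfl
      rw [PySem.List.enumerate_cons, List.foldl_cons, hcast]
      cases mode with
      | none =>
          obtain ⟨h1, h2, h3, h4⟩ := hinv
          have hPW : pvPW cs ((s : Int), (n : Int)) = PySem.Chars.split₀ buf := by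
            rw [pvPW]
            simp only [hslice]
            exact pvW_plain buf h1 h2 h3
          by_cases hq : c = '\'' ∨ c = '"'
          · rw [pvAStep_plain_quote cs n c hq, pvFold_split]
            simp only [List.cons_append, List.nil_append]
            rw [pvPairs_cons₂, List.flatMap_cons, hPW]
            have hIH := ih (n + 1) n [c] (some c) hd' (by omega)
              (by rw [Nat.add_sub_cancel_left, hbufc]) ⟨hq, [], rfl⟩
            rw [pvBGo, if_pos hq, pvBGo_append]; rw [hIH]
            simp
          · rw [not_or] at hq
            obtain ⟨hc1, hc2⟩ := hq
            by_cases hcm : c = '/' ∧ rest.head? = some '/'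
            · obtain ⟨hc, hr⟩ := hcm
              obtain ⟨r0, rest₂, rfl⟩ : ∃ r0 rest₂, rest = r0 :: rest₂ := by
                cases rest with
                | nil => simp at hr
                | cons a b => exact ⟨a, b, rfl⟩
              have hr0 : r0 = '/' := by simpa using hr
              rw [pvAStep_plain_comment cs n c _ hd hc hr, pvFold_split, pvFold_comment]
              simp only [List.append_nil, List.nil_append, List.cons_append]
              rw [pvPairs_cons₂]
              have hpairs2 : pvPairs [(n : Int), (cs.length : Int)] =
                  [((n : Int), (cs.length : Int))] := by simp [pvPairs]
              rw [hpairs2, List.flatMap_cons, List.flatMap_cons, List.flatMap_nil, hPW]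
              have hsliceC : PySem.List.slice cs (some (n : Int)) (some (cs.length : Int)) =
                  c :: r0 :: rest₂ := by
                rw [PySem.List.slice_natCast, ← hd]
                exact List.take_of_length_le (by simp)
              have hPWc : pvPW cs ((n : Int), (cs.length : Int)) =
                  [PySem.Chars.rstrip (c :: r0 :: rest₂)] := by
                rw [pvPW]
                simp only [hsliceC]
                subst hc hr0
                rw [pvStrip_cons _ _ (by decide), pvRstrip_cons _ _ (by decide), pvW_comment,
                  ← pvRstrip_cons _ _ (by decide), ← pvRstrip_cons _ _ (by decide)]
              rw [hPWc, pvBGo, if_neg ?_, if_pos ⟨hc, hr⟩]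
              · simp
              · rintro (h | h)
                · exact hc1 h
                · exact hc2 h
            · rw [pvAStep_plain_else cs n c rest hd hc1 hc2 hcm]
              have hIH := ih (n + 1) s (buf ++ [c]) none hd' (by omega)
                (by rw [← hslice1, PySem.List.slice_natCast])
                (pvInv_plain_step buf c rest ⟨h1, h2, h3, h4⟩ hc1 hc2 hcm)
              rw [hIH, pvBGo, if_neg ?_, if_neg hcm]
              rintro (h | h)
              · exact hc1 h
              · exact hc2 h
      | some q =>
          obtain ⟨hq, t, hbq⟩ := hinv
          have hqs : PySem.Chars.isspace q = false := by rcases hq with rfl | rfl <;> decide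
          have hblen : buf.length = n - s := by
            rw [hbuf]; exact pvBuf_len cs s n hs (by omega)
          have hbne : buf ≠ [] := by rw [hbq]; simp
          have hn1 : 1 ≤ n := by
            have : 0 < buf.length := by rw [hbq]; simp
            omega
          have hpre : PySem.List.pyGetD cs ((n : Int) - 1) ' ' =
              PySem.List.pyGetD buf (-1) ' ' :=
            pvLast_eq cs s n buf hs (by omega) hbuf hbne
          by_cases hP : c = q ∧ PySem.List.pyGetD buf (-1) ' ' ≠ '\\'
          · rw [pvAStep_quote_close cs n c q buf hq hn1 hpre hP.1 hP.2, pvFold_split, hcast]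
            simp only [List.cons_append, List.nil_append]
            rw [pvPairs_cons₂, List.flatMap_cons]
            have hPWq : pvPW cs ((s : Int), ((n + 1 : Nat) : Int)) = [buf ++ [c]] := by
              rw [pvPW]
              simp only [hslice1]
              have hform : buf ++ [c] = q :: (t ++ [c]) := by rw [hbq]; rfl
              rw [hform, pvStrip_cons _ _ hqs, pvRstrip_concat _ _ (by rw [hP.1]; exact hqs),
                pvW_quote _ _ hq]
            rw [hPWq]
            have hIH := ih (n + 1) (n + 1) [] none hd' (by omega)
              (by simp) ⟨by simp, by simp, by simp, by simp⟩
            rw [hIH, pvBGo, if_pos hP, pvBGo_append rest ([] ++ [buf ++ [c]])]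
            simp
          · rw [pvAStep_quote_stay cs n c q buf hq hn1 hpre hP]
            have hIH := ih (n + 1) s (buf ++ [c]) (some q) hd' (by omega)
              (by rw [← hslice1, PySem.List.slice_natCast])
              ⟨hq, t ++ [c], by rw [hbq]; rfl⟩
            rw [hIH, pvBGo, if_neg hP]

theorem pvAB (cs : List Char) :
    List.foldl (fun ws sl =>
      if sl = [] then ws
      else if PySem.Chars.startswith sl ['\''] || PySem.Chars.startswith sl ['"'] ||
              PySem.Chars.startswith sl ['/', '/'] then ws ++ [sl]
      else ws ++ PySem.Chars.split₀ sl) [] (pvASlices cs) = pvBGo [] [] none cs := by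
  rw [pvA_words]
  have h := pvMain cs cs 0 0 [] none (by simp) (le_refl 0) (by simp)
    ⟨by simp, by simp, by simp, by simp⟩
  simpa [pvFlags, List.cons_append] using h

-- ===== VERDICT (by name: the statement is the Claim_ definition above) =====
theorem split_line_to_words_spec : Claim_equal_split_line_to_words := by
  intro line _
  unfold Spec_split_line_to_words split_line_to_words split_line_to_words_alt
  rw [pvAB]
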